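-- pv_equiv track=rewrite | github.com/czyarl/ga_for_cvrptw | solver.py | _split_routes
-- ===== SOURCE A (Python) =====
-- from typing import List, Dict, Tuple
--
-- def _split_routes(solution: List[int], customers: List[Dict], depot: Dict, capacity: int, number: int) -> List[List[int]]:
--     """将基因序列分割为有效路径，不进行过多的检查"""
--     routes = []
--     current_route = []
--     for gene in solution:
--         if gene == 0:
--             routes.append(current_route.copy())
--             current_route = []
--         else:
--             current_route.append(int(gene))
--     routes.append(current_route)
--     return routes
-- ===== SOURCE B (Python) =====
-- def _split_routes(solution, customers, depot, capacity, number):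
--     """Split at zeros by repeatedly finding the next delimiter and slicing,
--     instead of accumulating a current route element by element."""
--     routes = []
--     rest = solution
--     while 0 in rest:
--         i = rest.index(0)
--         routes.append([int(g) for g in rest[:i]])
--         rest = rest[i + 1:]
--     routes.append([int(g) for g in rest])
--     return routes
-- ===== Notes on version B (the rewrite author's own statement) =====
-- stated objective: alternative
-- what changed: Replaces the element-by-element scan that accumulates a current_route with a find-next-zero-and-slice loop: each route is produced as one slice rest[:index(0)] and the remainder rest[i+1:] is processed next.
import Mathlib
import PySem

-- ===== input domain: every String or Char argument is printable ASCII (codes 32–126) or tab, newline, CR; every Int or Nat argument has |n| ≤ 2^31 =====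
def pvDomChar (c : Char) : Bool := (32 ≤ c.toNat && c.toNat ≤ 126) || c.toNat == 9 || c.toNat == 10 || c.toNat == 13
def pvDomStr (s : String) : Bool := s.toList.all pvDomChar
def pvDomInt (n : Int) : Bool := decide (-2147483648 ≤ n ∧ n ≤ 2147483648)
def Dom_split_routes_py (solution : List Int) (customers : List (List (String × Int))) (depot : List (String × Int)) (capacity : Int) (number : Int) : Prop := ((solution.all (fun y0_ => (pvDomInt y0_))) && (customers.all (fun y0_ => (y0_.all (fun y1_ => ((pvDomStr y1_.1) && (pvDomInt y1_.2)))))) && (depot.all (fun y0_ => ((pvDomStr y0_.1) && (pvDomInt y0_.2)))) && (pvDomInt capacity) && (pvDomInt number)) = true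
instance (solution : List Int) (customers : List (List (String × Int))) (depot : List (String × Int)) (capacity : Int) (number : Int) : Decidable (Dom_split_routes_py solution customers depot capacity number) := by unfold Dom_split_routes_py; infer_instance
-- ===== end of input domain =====

-- B replaces A's element-by-element accumulating scan with a find-next-zero-and-slice loop (alternative decomposition, same O(n) cost).


-- ===== PORT A =====
-- A: for gene in solution: if gene == 0 push current_route and reset, else append int(gene)
-- (int(gene) is the identity on Int); finally append the last current_route.
def split_routes_py (solution : List Int) (customers : List (List (String × Int))) (depot : List (String × Int)) (capacity : Int) (number : Int) : List (List Int) :=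
  let p := solution.foldl
    (fun (st : List (List Int) × List Int) gene =>
      if gene = 0 then (st.1 ++ [st.2], ([] : List Int)) else (st.1, st.2 ++ [gene]))
    ([], [])
  p.1 ++ [p.2]

-- ===== PORT B =====
-- B's while loop: while 0 in rest, take i = rest.index(0), append rest[:i], continue with rest[i+1:];
-- finally append rest.  ([int(g) for g in xs] is the identity on a list of Int.)
def splitRoutesAltLoop (routes : List (List Int)) (rest : List Int) : List (List Int) :=
  match h : PySem.List.index? rest 0 with
  | some i =>
      splitRoutesAltLoop (routes ++ [PySem.List.slice rest none (some (i : Int))])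
        (PySem.List.slice rest (some ((i : Int) + 1)) none)
  | none => routes ++ [rest]
termination_by rest.length
decreasing_by
  obtain ⟨pre, suf, hrest, hlen, _⟩ := (PySem.List.index?_eq_some_iff rest 0 i).mp h
  have : (i : Int) + 1 = ((i + 1 : Nat) : Int) := by push_cast; ring
  rw [this, PySem.List.slice_from_natCast]
  simp [hrest, ← hlen]
  omega

def split_routes_py_alt (solution : List Int) (customers : List (List (String × Int))) (depot : List (String × Int)) (capacity : Int) (number : Int) : List (List Int) :=
  splitRoutesAltLoop [] solution

-- ===== PRECONDITION & SPEC =====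
def Spec_split_routes_py (solution : List Int) (customers : List (List (String × Int))) (depot : List (String × Int)) (capacity : Int) (number : Int) (out : List (List Int)) : Prop := out = split_routes_py_alt solution customers depot capacity number
instance (solution : List Int) (customers : List (List (String × Int))) (depot : List (String × Int)) (capacity : Int) (number : Int) (out : List (List Int)) : Decidable (Spec_split_routes_py solution customers depot capacity number out) := by unfold Spec_split_routes_py; infer_instance

-- ===== CLAIM (what is proved, stated in full; the proofs are below) =====
def Claim_equal_split_routes_py : Prop := ∀ (solution : List Int) (customers : List (List (String × Int))) (depot : List (String × Int)) (capacity : Int) (number : Int), Dom_split_routes_py solution customers depot capacity number → Spec_split_routes_py solution customers depot capacity number (split_routes_py solution customers depot capacity number)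

-- ===== LEMMAS AND PROOFS =====

/-- Reference splitter: the common meaning of both programs. Proof-only helper. -/
def srSplit : List Int → List (List Int)
  | [] => [[]]
  | g :: t => if g = 0 then [] :: srSplit t else (srSplit t).modifyHead (g :: ·)

lemma srSplit_ne_nil (l : List Int) : srSplit l ≠ [] := by
  induction l with
  | nil => simp [srSplit]
  | cons g t ih =>
    simp only [srSplit]
    split_ifs
    · simp
    · rcases hne : srSplit t with _ | ⟨r, rs⟩
      · exact absurd hne ih
      · simp

lemma srSplit_no_zero (l : List Int) (h : (0 : Int) ∉ l) : srSplit l = [l] := by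
  induction l with
  | nil => rfl
  | cons g t ih =>
    simp only [List.mem_cons, not_or] at h
    simp [srSplit, Ne.symm h.1, ih h.2]

lemma srSplit_append (pre suf : List Int) (h : (0 : Int) ∉ pre) :
    srSplit (pre ++ 0 :: suf) = pre :: srSplit suf := by
  induction pre with
  | nil => simp [srSplit]
  | cons g p ih =>
    simp only [List.mem_cons, not_or] at h
    simp [srSplit, Ne.symm h.1, ih h.2]

lemma splitRoutesAltLoop_eq (routes : List (List Int)) (rest : List Int) :
    splitRoutesAltLoop routes rest = routes ++ srSplit rest := by
  fun_induction splitRoutesAltLoop with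
  | case1 routes rest i h ih =>
    obtain ⟨pre, suf, hrest, hlen, hpre⟩ := (PySem.List.index?_eq_some_iff rest 0 i).mp h
    have h1 : PySem.List.slice rest none (some (i : Int)) = pre := by
      rw [PySem.List.slice_to_natCast, hrest, ← hlen, List.take_left]
    have h2 : PySem.List.slice rest (some ((i : Int) + 1)) none = suf := by
      have hc : (i : Int) + 1 = ((i + 1 : Nat) : Int) := by push_cast; ring
      rw [hc, PySem.List.slice_from_natCast, hrest,
        show pre ++ 0 :: suf = (pre ++ [0]) ++ suf by simp]
      exact List.drop_left' (by simp [hlen])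
    rw [h1, h2] at ih ⊢
    rw [ih, hrest, srSplit_append pre suf hpre]
    simp
  | case2 routes rest h =>
    rw [srSplit_no_zero rest ((PySem.List.index?_eq_none_iff rest 0).mp h)]

lemma foldlA_eq (l : List Int) : ∀ (rs : List (List Int)) (cur : List Int),
    (let p := l.foldl
        (fun (st : List (List Int) × List Int) gene =>
          if gene = 0 then (st.1 ++ [st.2], ([] : List Int)) else (st.1, st.2 ++ [gene]))
        (rs, cur)
     p.1 ++ [p.2]) = rs ++ (srSplit l).modifyHead (cur ++ ·) := by
  induction l with
  | nil => intro rs cur; simp [srSplit]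
  | cons g t ih =>
    intro rs cur
    by_cases hg : g = 0
    · simp only [List.foldl_cons, hg, srSplit, ih]
      rcases srSplit t with _ | ⟨r, rs'⟩ <;> simp
    · simp only [List.foldl_cons, if_neg hg, srSplit, ih]
      rcases hne : srSplit t with _ | ⟨r, rs'⟩
      · exact absurd hne (srSplit_ne_nil t)
      · simp

-- ===== VERDICT (by name: the statement is the Claim_ definition above) =====
theorem split_routes_py_spec : Claim_equal_split_routes_py := by
  intro solution customers depot capacity number _
  unfold Spec_split_routes_py split_routes_py split_routes_py_alt
  rw [splitRoutesAltLoop_eq, foldlA_eq]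
  rcases h : srSplit solution with _ | ⟨r, rs⟩
  · exact absurd h (srSplit_ne_nil solution)
  · simp
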